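-- pv_equiv track=rewrite | github.com/vazrupe/okky-question | q5.py | next_dict_str
-- ===== SOURCE A (Python) =====
-- def next_dict_str(w):
--     if not exist_next_dict_str(w):
--         return None
--     s = w[::-1]
--
--     switch_ok = False
--     str_size = len(s)
--     for i in range(str_size - 1):
--         for j in range(i + 1, str_size):
--             if s[i] > s[j]:
--                 tmp = [c for c in s]
--                 tmp[i], tmp[j] = (tmp[j], tmp[i])
--                 s = ''.join(tmp)
--                 switch_ok = True
--                 break
--         if switch_ok:
--             break
--
--     return s[::-1]
--
-- def exist_next_dict_str(w):
--     str_size = len(w)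
--     if str_size < 2:
--         return False
--     for i in range(str_size - 1):
--         if w[i] < w[i+1]:
--             return True
--     return False
-- ===== SOURCE B (Python) =====
-- def next_dict_str(w):
--     s = list(w[::-1])
--     n = len(s)
--     if n < 2:
--         return None
--     # One right-to-left pass with a running suffix minimum:
--     # i = first index with s[i] > min(s[i+1:]), or None if s is non-decreasing.
--     m = s[n - 1]
--     i = None
--     for k in range(n - 2, -1, -1):
--         if s[k] > m:
--             i = k
--         if s[k] < m:
--             m = s[k]
--     if i is None:
--         return None
--     # first j > i with s[j] < s[i] (exists, since min(s[i+1:]) < s[i])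
--     j = i + 1
--     while s[j] >= s[i]:
--         j += 1
--     s[i], s[j] = s[j], s[i]
--     return ''.join(reversed(s))
-- ===== Notes on version B (the rewrite author's own statement) =====
-- stated objective: alternative
-- what changed: A rescans the whole suffix for every position i (nested loops, quadratic worst case); B finds the swap position i in ONE right-to-left pass with a running suffix minimum (which also subsumes A's separate exist_next_dict_str pre-scan), then one forward scan for j, O(n) worst case; on the benchmark's inputs A short-circuits too, so no measured speed-up is claimed.
import Mathlib
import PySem

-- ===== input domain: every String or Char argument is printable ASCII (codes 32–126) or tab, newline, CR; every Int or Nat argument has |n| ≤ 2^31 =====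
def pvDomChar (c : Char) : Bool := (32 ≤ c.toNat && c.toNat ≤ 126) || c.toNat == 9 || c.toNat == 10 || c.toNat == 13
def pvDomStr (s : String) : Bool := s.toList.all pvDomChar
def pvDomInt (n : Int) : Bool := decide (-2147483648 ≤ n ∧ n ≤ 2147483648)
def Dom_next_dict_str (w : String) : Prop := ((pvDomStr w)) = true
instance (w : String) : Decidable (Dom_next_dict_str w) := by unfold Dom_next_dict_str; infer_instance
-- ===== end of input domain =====

-- B replaces A's nested loops by one right-to-left pass with a running suffix
-- minimum plus one forward scan; same return value on every input.


-- ===== PORT A =====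
-- exist_next_dict_str: 'for i in range(n-1): if w[i] < w[i+1]: return True' — walk of
-- adjacent pairs with early exit
def pvExistA : List Char → Bool
  | a :: b :: t => a < b || pvExistA (b :: t)
  | _ => false

-- inner loop 'for j in range(i+1,n): if s[i] > s[j]: tmp[i],tmp[j] = tmp[j],tmp[i]; break'
-- as a walk over the suffix after i: at the first d with c > d it returns
-- (d, suffix with c written at d's place); none if the loop falls through
def pvInnerA (c : Char) : List Char → Option (Char × List Char)
  | [] => none
  | d :: t =>
    if c > d then some (d, c :: t)
    else match pvInnerA c t with
         | some (x, t') => some (x, d :: t')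
         | none => none

-- outer loop over i with the switch_ok early exit; none = no swap happened
def pvOuterA : List Char → Option (List Char)
  | [] => none
  | c :: rest =>
    match pvInnerA c rest with
    | some (x, rest') => some (x :: rest')
    | none =>
      match pvOuterA rest with
      | some rest' => some (c :: rest')
      | none => none

def next_dict_str (w : String) : Option String :=
  if pvExistA w.toList then
    let s := w.toList.reverse
    match pvOuterA s with
    | some s' => some (String.ofList s'.reverse)
    | none => some (String.ofList s.reverse)
  else none

-- ===== PORT B =====
-- the single right-to-left pass of Source B: returns (running minimum of s,
-- first index i with s[i] > min(s[i+1:]), none if there is no such i)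
def pvScanB : List Char → Char × Option Nat
  | [] => (default, none)
  | [c] => (c, none)
  | c :: d :: t =>
    let (m, r) := pvScanB (d :: t)
    (if c < m then c else m, if c > m then some 0 else r.map (· + 1))

-- the 'j = i+1; while s[j] >= s[i]: j += 1' scan plus 's[i], s[j] = s[j], s[i]':
-- walks past the elements ≥ c and exchanges c with the first smaller one
def pvPlaceB (c : Char) : List Char → Char × List Char
  | [] => (c, [])   -- unreachable: a smaller element exists in the suffix
  | d :: t =>
    if d < c then (d, c :: t)
    else
      let (x, t') := pvPlaceB c t
      (x, d :: t')

-- walk to position i, then do the j-scan and the swap there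
def pvSwapB : List Char → Nat → List Char
  | [], _ => []
  | c :: t, 0 => let (x, t') := pvPlaceB c t; x :: t'
  | c :: t, i + 1 => c :: pvSwapB t i

def next_dict_str_alt (w : String) : Option String :=
  let s := w.toList.reverse
  match (pvScanB s).2 with
  | none => none
  | some i => some (String.ofList (pvSwapB s i).reverse)

-- ===== PRECONDITION & SPEC =====
def Spec_next_dict_str (w : String) (out : Option String) : Prop := out = next_dict_str_alt w
instance (w : String) (out : Option String) : Decidable (Spec_next_dict_str w out) := by unfold Spec_next_dict_str; infer_instance

-- ===== CLAIM (what is proved, stated in full; the proofs are below) =====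
def Claim_equal_next_dict_str : Prop := ∀ (w : String), Dom_next_dict_str w → Spec_next_dict_str w (next_dict_str w)

-- ===== LEMMAS AND PROOFS =====

theorem pvScanB_fst_cons (c d : Char) (t : List Char) :
    (pvScanB (c :: d :: t)).1 = if c < (pvScanB (d :: t)).1 then c else (pvScanB (d :: t)).1 := by
  rcases hsc : pvScanB (d :: t) with ⟨m, r⟩
  simp [pvScanB, hsc]

theorem pvScanB_snd_cons (c d : Char) (t : List Char) :
    (pvScanB (c :: d :: t)).2
      = if c > (pvScanB (d :: t)).1 then some 0 else ((pvScanB (d :: t)).2).map (· + 1) := by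
  rcases hsc : pvScanB (d :: t) with ⟨m, r⟩
  simp [pvScanB, hsc]

-- the first component of pvScanB is a member of the (nonempty) list …
theorem pvScanB_fst_mem : ∀ (t : List Char), t ≠ [] → (pvScanB t).1 ∈ t := by
  intro t
  induction t with
  | nil => intro h; exact absurd rfl h
  | cons c t ih =>
    intro _
    cases t with
    | nil => simp [pvScanB]
    | cons d t' =>
      rw [pvScanB_fst_cons]
      by_cases h : c < (pvScanB (d :: t')).1
      · rw [if_pos h]; simp
      · rw [if_neg h]; exact List.mem_cons_of_mem c (ih (by simp))

-- … and a lower bound for every element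
theorem pvScanB_fst_le : ∀ (t : List Char), ∀ d ∈ t, (pvScanB t).1 ≤ d := by
  intro t
  induction t with
  | nil => intro d hd; simp at hd
  | cons c t ih =>
    intro e he
    cases t with
    | nil => simp at he; simp [pvScanB, he]
    | cons d t' =>
      rw [pvScanB_fst_cons]
      rcases List.mem_cons.mp he with rfl | he'
      · by_cases h : e < (pvScanB (d :: t')).1
        · rw [if_pos h]
        · rw [if_neg h]; exact not_lt.mp h
      · have hle := ih e he'
        by_cases h : c < (pvScanB (d :: t')).1
        · rw [if_pos h]; exact le_trans (le_of_lt h) hle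
        · rw [if_neg h]; exact hle

-- A's inner loop falls through exactly when no later element is smaller
theorem pvInnerA_none_iff : ∀ (c : Char) (t : List Char),
    pvInnerA c t = none ↔ ∀ d ∈ t, ¬ c > d := by
  intro c t
  induction t with
  | nil => simp [pvInnerA]
  | cons d t ih =>
    constructor
    · intro hnone x hx
      by_cases h : c > d
      · simp [pvInnerA, h] at hnone
      · rcases List.mem_cons.mp hx with rfl | hx'
        · exact h
        · cases hrec : pvInnerA c t with
          | some p =>
            obtain ⟨y, t'⟩ := p
            simp [pvInnerA, h, hrec] at hnone
          | none => exact (ih.mp hrec) x hx'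
    · intro hall
      have h : ¬ c > d := hall d List.mem_cons_self
      have hrec : pvInnerA c t = none :=
        ih.mpr (fun x hx => hall x (List.mem_cons_of_mem _ hx))
      simp [pvInnerA, h, hrec]

-- when a smaller later element exists, A's inner loop computes exactly B's pvPlaceB
theorem pvInnerA_eq_place : ∀ (c : Char) (t : List Char),
    (∃ d ∈ t, d < c) → pvInnerA c t = some (pvPlaceB c t) := by
  intro c t
  induction t with
  | nil => intro ⟨d, hd, _⟩; simp at hd
  | cons d t ih =>
    intro ⟨e, he, hlt⟩
    by_cases h : d < c
    · simp [pvInnerA, pvPlaceB, h, gt_iff_lt]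
    · rcases List.mem_cons.mp he with rfl | he'
      · exact absurd hlt h
      · have hrec := ih ⟨e, he', hlt⟩
        rcases hpl : pvPlaceB c t with ⟨x, t'⟩
        rw [hpl] at hrec
        simp [pvInnerA, pvPlaceB, gt_iff_lt, h, hrec, hpl]

-- master lemma: A's nested loops equal B's scan-then-swap, on every list
theorem pvOuterA_eq_scanB : ∀ (s : List Char),
    pvOuterA s = Option.map (pvSwapB s) (pvScanB s).2 := by
  intro s
  induction s with
  | nil => simp [pvOuterA, pvScanB]
  | cons c t ih =>
    cases t with
    | nil => simp [pvOuterA, pvInnerA, pvScanB]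
    | cons d t' =>
      rw [pvScanB_snd_cons]
      by_cases h : c > (pvScanB (d :: t')).1
      · rw [if_pos h]
        have hmem := pvScanB_fst_mem (d :: t') (by simp)
        have hinner := pvInnerA_eq_place c (d :: t') ⟨_, hmem, h⟩
        rcases hpl : pvPlaceB c (d :: t') with ⟨x, tt⟩
        rw [hpl] at hinner
        rw [pvOuterA, hinner]
        simp [pvSwapB, hpl]
      · rw [if_neg h]
        have hinner : pvInnerA c (d :: t') = none := by
          rw [pvInnerA_none_iff]
          intro e he hce
          exact h (lt_of_le_of_lt (pvScanB_fst_le (d :: t') e he) hce)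
        rw [pvOuterA, hinner, ih]
        cases hr : (pvScanB (d :: t')).2 with
        | none => simp
        | some i => simp [pvSwapB]

-- A's exist_next_dict_str is false exactly when the word is non-increasing
theorem pvExistA_false_iff : ∀ (l : List Char),
    pvExistA l = false ↔ l.Pairwise (fun a b => b ≤ a) := by
  intro l
  induction l with
  | nil => simp [pvExistA]
  | cons a t ih =>
    cases t with
    | nil => simp [pvExistA]
    | cons b t' =>
      simp only [pvExistA, Bool.or_eq_false_iff, decide_eq_false_iff_not, not_lt, ih,
        List.pairwise_cons]
      constructor
      · rintro ⟨hab, hall, hp⟩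
        refine ⟨fun x hx => ?_, hall, hp⟩
        rcases List.mem_cons.mp hx with rfl | hx'
        · exact hab
        · exact le_trans (hall x hx') hab
      · rintro ⟨hall, hall', hp⟩
        exact ⟨hall b List.mem_cons_self, hall', hp⟩

-- B's scan reports no index exactly when the reversed word is non-decreasing
theorem pvScanB_none_iff : ∀ (s : List Char),
    (pvScanB s).2 = none ↔ s.Pairwise (· ≤ ·) := by
  intro s
  induction s with
  | nil => simp [pvScanB]
  | cons c t ih =>
    cases t with
    | nil => simp [pvScanB]
    | cons d t' =>
      rw [pvScanB_snd_cons]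
      by_cases h : c > (pvScanB (d :: t')).1
      · rw [if_pos h]
        constructor
        · intro hx; simp at hx
        · intro hp
          exact absurd ((List.pairwise_cons.mp hp).1 _ (pvScanB_fst_mem (d :: t') (by simp)))
            (not_le_of_gt h)
      · rw [if_neg h, Option.map_eq_none_iff, ih]
        constructor
        · intro hp
          exact List.pairwise_cons.mpr
            ⟨fun x hx => le_trans (not_lt.mp h) (pvScanB_fst_le (d :: t') x hx), hp⟩
        · intro hp
          exact (List.pairwise_cons.mp hp).2

-- ===== VERDICT (by name: the statement is the Claim_ definition above) =====
theorem next_dict_str_spec : Claim_equal_next_dict_str := by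
  intro w _
  show next_dict_str w = next_dict_str_alt w
  unfold next_dict_str next_dict_str_alt
  by_cases h : pvExistA w.toList = true
  · have hnp : ¬ w.toList.Pairwise (fun a b => b ≤ a) := by
      intro hp
      rw [← pvExistA_false_iff] at hp
      simp [hp] at h
    have hs : ¬ (pvScanB w.toList.reverse).2 = none := by
      rw [pvScanB_none_iff, List.pairwise_reverse]
      exact hnp
    cases hscan : (pvScanB w.toList.reverse).2 with
    | none => exact absurd hscan hs
    | some i =>
      have houter := pvOuterA_eq_scanB w.toList.reverse
      rw [hscan] at houter
      simp only [Option.map_some] at houter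
      simp [h, houter, hscan]
  · simp only [Bool.not_eq_true] at h
    have hp : (pvScanB w.toList.reverse).2 = none := by
      rw [pvScanB_none_iff, List.pairwise_reverse]
      exact (pvExistA_false_iff w.toList).mp h
    simp [h, hp]
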